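-- pv_equiv track=rewrite | github.com/Miesvanderlippe/ISCRIP | Week5/forsyth_edwards_notatie-s1096607-ifict-poging1.py | grid2fen
-- ===== SOURCE A (Python) =====
-- def grid2fen(string: str, separator: str = '*') -> str:
--     """
--     Zet een volledig uitgeschreven grid om in een Fen notatie
--     :param string: De grid
--     :param separator: De gebruikte separator
--     :return: De fen notatie
--     """
--     # Breekt de grid op in secies van 8 regels
--     lines = [
--         str(string[i:i + 8]) for i in
--         range(0, len(string), 8)
--     ]
--     result = []
--
--     for line in lines:
--         for i in range(8, 0, -1):
--             # Slordig en goor, maar het werkt!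
--             line = line.replace(separator * i, str(i))
--
--         result.append(line)
--
--     return "/".join(result)
-- ===== SOURCE B (Python) =====
-- def grid2fen(string: str, separator: str = '*') -> str:
--     """Grid -> FEN-like notation: one left-to-right scan per 8-char chunk,
--     counting runs of consecutive separator tokens."""
--     def encode(chunk):
--         out = []
--         pos = 0
--         count = 0
--         while pos < len(chunk):
--             if chunk.startswith(separator, pos):
--                 count += 1
--                 pos += len(separator)
--             else:
--                 if count:
--                     out.append(str(count))
--                     count = 0
--                 out.append(chunk[pos])
--                 pos += 1
--         if count:
--             out.append(str(count))
--         return ''.join(out)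
--
--     return "/".join(encode(string[i:i + 8]) for i in range(0, len(string), 8))
-- ===== Notes on version B (the rewrite author's own statement) =====
-- stated objective: alternative
-- what changed: Replaces A's eight sequential str.replace passes per 8-char chunk with a single left-to-right scan that counts runs of consecutive separator tokens and flushes the count before each non-separator character.
-- outside the precondition, e.g. on grid2fen('', ''): A returns '', B returns ''; on grid2fen('22a2', '2'): A returns '1a1', B returns '2a1'; on grid2fen('ababaaba', 'aba'): A returns 'ab2', B returns '1ba1'
import Mathlib
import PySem

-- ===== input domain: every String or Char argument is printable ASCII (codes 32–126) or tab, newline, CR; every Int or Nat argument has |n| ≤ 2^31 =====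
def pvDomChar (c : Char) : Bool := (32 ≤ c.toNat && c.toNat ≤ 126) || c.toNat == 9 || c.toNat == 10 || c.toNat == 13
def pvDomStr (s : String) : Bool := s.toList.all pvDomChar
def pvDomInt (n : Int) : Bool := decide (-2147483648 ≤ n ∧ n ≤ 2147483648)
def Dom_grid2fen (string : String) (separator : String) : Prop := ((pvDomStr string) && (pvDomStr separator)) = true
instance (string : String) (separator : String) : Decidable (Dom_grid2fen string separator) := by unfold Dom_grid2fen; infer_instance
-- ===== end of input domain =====

-- B replaces A's eight sequential str.replace passes per 8-char chunk by one left-to-right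
-- scan counting runs of consecutive separator tokens (objective: alternative algorithm, same cost).

-- ===== PORT A =====
-- 'separator * i' is ported by hand as PySem.List.pyRepeat on the code points (exact: string
-- repetition is list repetition of the code points).
def grid2fen (string : String) (separator : String) : String :=
  let lines : List String :=
    (PySem.List.pyRange 0 (PySem.Str.len string) 8).map
      (fun i => PySem.Str.slice string (some i) (some (i + 8)))
  let result : List String :=
    lines.foldl
      (fun res line =>
        res ++ [(PySem.List.pyRange 8 0 (-1)).foldl
          (fun l i =>
            PySem.Str.replace l (String.ofList (PySem.List.pyRepeat separator.toList i))
              (PySem.Int.toStr i)) line]) []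
  PySem.Str.join "/" result

-- ===== PORT B =====
-- the while-loop of Source B's encode(): pos ↦ the remaining suffix of the chunk; 'sep ≠ []' in the
-- guard is needed for termination only — Source B diverges on separator = '' (outside Pre_).
def pvEncChunk (sep : List Char) : List Char → Int → List Char
  | s, count =>
    match s with
    | [] => if count > 0 then PySem.Int.toChars count else []
    | c :: t =>
      if h : sep ≠ [] ∧ sep <+: (c :: t) then
        pvEncChunk sep ((c :: t).drop sep.length) (count + 1)
      else
        (if count > 0 then PySem.Int.toChars count else []) ++ c :: pvEncChunk sep t 0
  termination_by s _ => s.length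
  decreasing_by
  · simp only [List.length_drop, List.length_cons]
    have : 1 ≤ sep.length := List.length_pos_iff.mpr h.1
    omega
  · simp

def grid2fen_alt (string : String) (separator : String) : String :=
  PySem.Str.join "/"
    (((PySem.List.pyRange 0 (PySem.Str.len string) 8).map
        (fun i => PySem.Str.slice string (some i) (some (i + 8)))).map
      (fun chunk => String.ofList (pvEncChunk separator.toList chunk.toList 0)))

-- ===== PRECONDITION & SPEC =====
-- Pre_ excludes the empty separator (A degenerately interleaves the counts 8..1 between all
-- characters while B's scan diverges), separators containing a digit (A's inserted count digits
-- can re-match such separators and cascade through later replace passes), and self-overlapping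
-- (bordered) separators (str.replace can match separator*i at positions misaligned with the
-- left-to-right token scan) — all corners of str.replace no caller of a FEN encoder would rely on.
def Pre_grid2fen (string : String) (separator : String) : Prop :=
  separator ≠ "" ∧
  separator.toList.all (fun c => ! PySem.Chars.isdigit c) = true ∧
  (List.range separator.toList.length).all
    (fun o => o == 0 ||
      ! (separator.toList.drop o == separator.toList.take (separator.toList.length - o))) = true
instance (string : String) (separator : String) : Decidable (Pre_grid2fen string separator) := by
  unfold Pre_grid2fen; infer_instance

def pvWitness_grid2fen : String × String := ("**q*", "*")

def Spec_grid2fen (string : String) (separator : String) (out : String) : Prop :=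
  out = grid2fen_alt string separator
instance (string : String) (separator : String) (out : String) :
    Decidable (Spec_grid2fen string separator out) := by unfold Spec_grid2fen; infer_instance

-- ===== CLAIM (what is proved, stated in full; the proofs are below) =====
def Claim_equal_grid2fen : Prop := ∀ (string : String) (separator : String),
  Dom_grid2fen string separator → Pre_grid2fen string separator →
  Spec_grid2fen string separator (grid2fen string separator)

-- ===== LEMMAS AND PROOFS =====

-- Items of the greedy decomposition of a chunk: a literal char, or a run of m ≥ 1 separators.
inductive PvItem : Type
  | chr : Char → PvItem
  | run : Nat → PvItem

def pvRep (p : List Char) (m : Nat) : List Char := (List.replicate m p).flatten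

def pvDecode (p : List Char) : List PvItem → List Char
  | [] => []
  | .chr c :: ts => c :: pvDecode p ts
  | .run m :: ts => pvRep p m ++ pvDecode p ts

-- greedy well-formedness: at a literal char the separator does not match; a run is maximal.
def pvWF (p : List Char) : List PvItem → Prop
  | [] => True
  | .chr c :: ts => ¬ p <+: (c :: pvDecode p ts) ∧ pvWF p ts
  | .run m :: ts => 1 ≤ m ∧ ¬ p <+: pvDecode p ts ∧ pvWF p ts

def pvRunsLE (j : Nat) (ts : List PvItem) : Prop := ∀ m, PvItem.run m ∈ ts → m ≤ j

def pvEncItems : List PvItem → List Char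
  | [] => []
  | .chr c :: ts => c :: pvEncItems ts
  | .run m :: ts => PySem.Int.toChars (m : Int) ++ pvEncItems ts

def pvSubst (j : Nat) (ts : List PvItem) : List PvItem :=
  ts.flatMap fun it => match it with
    | .run m => if m = j then (PySem.Int.toChars (j : Int)).map PvItem.chr else [.run m]
    | .chr c => [.chr c]

def pvUnb (p : List Char) : Prop :=
  ∀ o, o < p.length → 0 < o → p.drop o ≠ p.take (p.length - o)

lemma pvRep_zero (p : List Char) : pvRep p 0 = [] := rfl
lemma pvRep_succ (p : List Char) (m : Nat) : pvRep p (m + 1) = p ++ pvRep p m := by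
  simp [pvRep, List.replicate_succ]
lemma pvRep_add (p : List Char) (a b : Nat) : pvRep p (a + b) = pvRep p a ++ pvRep p b := by
  unfold pvRep; rw [List.replicate_add, List.flatten_append]
lemma pvRep_length (p : List Char) (m : Nat) : (pvRep p m).length = m * p.length := by
  simp [pvRep]

lemma pvDecode_append (p : List Char) (a b : List PvItem) :
    pvDecode p (a ++ b) = pvDecode p a ++ pvDecode p b := by
  induction a with
  | nil => rfl
  | cons it ts ih => cases it <;> simp [pvDecode, ih]

lemma pvDecode_map_chr (p : List Char) (ds : List Char) :
    pvDecode p (ds.map PvItem.chr) = ds := by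
  induction ds with
  | nil => rfl
  | cons d ds ih => simp [pvDecode, ih]

lemma pvEncItems_append (a b : List PvItem) :
    pvEncItems (a ++ b) = pvEncItems a ++ pvEncItems b := by
  induction a with
  | nil => rfl
  | cons it ts ih => cases it <;> simp [pvEncItems, ih]

lemma pvEncItems_map_chr (ds : List Char) :
    pvEncItems (ds.map PvItem.chr) = ds := by
  induction ds with
  | nil => rfl
  | cons d ds ih => simp [pvEncItems, ih]

-- ===== border argument =====
lemma pvBorder_no_match {p : List Char} (hub : pvUnb p) {o : Nat} (ho : 0 < o)
    (holt : o < p.length) (z : List Char) : ¬ p <+: (p.drop o ++ z) := by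
  intro h
  have htake := List.prefix_iff_eq_take.mp h
  apply hub o holt ho
  have h1 : p.take (p.length - o) = (p.drop o ++ z).take (p.length - o) := by
    have hc := congrArg (List.take (p.length - o)) htake
    rw [List.take_take] at hc
    have hmin : min (p.length - o) p.length = p.length - o := by omega
    rw [hmin] at hc
    exact hc
  have h2 : (p.drop o ++ z).take (p.length - o) = p.drop o := by
    have hl : (p.drop o).length = p.length - o := by simp
    rw [← hl, List.take_left]
  rw [h1, h2]

lemma pvRunStart_no_match {p : List Char} (hp : p ≠ []) {m j : Nat} (hmj : m < j)
    {y : List Char} (hy : ¬ p <+: y) : ¬ pvRep p j <+: (pvRep p m ++ y) := by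
  intro h
  have hdecomp : pvRep p j = pvRep p m ++ pvRep p (j - m) := by
    rw [← pvRep_add]; congr 1; omega
  rw [hdecomp] at h
  have h2 : pvRep p (j - m) <+: y := (List.prefix_append_right_inj _).mp h
  apply hy
  have hjm : j - m = (j - m - 1) + 1 := by omega
  have : p <+: pvRep p (j - m) := by
    rw [hjm, pvRep_succ]; exact List.prefix_append _ _
  exact this.trans h2

-- ===== equations for PySem.Chars.replace.go =====
lemma pvGo_nil (old new : List Char) (fuel : Nat) (acc : List Char) :
    PySem.Chars.replace.go old new fuel [] acc = acc.reverse := by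
  cases fuel <;> simp [PySem.Chars.replace.go]

lemma pvGo_char {old : List Char} (new : List Char) {c : Char} {t : List Char}
    (h : ¬ old <+: (c :: t)) (fuel : Nat) (acc : List Char) :
    PySem.Chars.replace.go old new (fuel + 1) (c :: t) acc
      = PySem.Chars.replace.go old new fuel t (c :: acc) := by
  have hb : old.isPrefixOf (c :: t) = false := by
    rw [Bool.eq_false_iff]
    intro hx
    exact h (List.isPrefixOf_iff_prefix.mp hx)
  simp [PySem.Chars.replace.go, hb]

lemma pvGo_match {old : List Char} (new : List Char) {l : List Char} (hl : l ≠ [])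
    (h : old <+: l) (fuel : Nat) (acc : List Char) :
    PySem.Chars.replace.go old new (fuel + 1) l acc
      = PySem.Chars.replace.go old new fuel (l.drop old.length) (new.reverse ++ acc) := by
  obtain ⟨c, t, rfl⟩ := List.exists_cons_of_ne_nil hl
  have hb : old.isPrefixOf (c :: t) = true := List.isPrefixOf_iff_prefix.mpr h
  simp [PySem.Chars.replace.go, hb]

lemma pvRep_ne_nil {p : List Char} (hp : p ≠ []) {m : Nat} (hm : 1 ≤ m) :
    pvRep p m ≠ [] := by
  have h : m = (m - 1) + 1 := by omega
  rw [h, pvRep_succ]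
  simp [hp]

lemma pvSubst_nil {j : Nat} : pvSubst j [] = [] := rfl
lemma pvSubst_cons_chr {j : Nat} {c : Char} {ts : List PvItem} :
    pvSubst j (.chr c :: ts) = .chr c :: pvSubst j ts := by simp [pvSubst]
lemma pvSubst_cons_run_eq {j : Nat} {ts : List PvItem} :
    pvSubst j (.run j :: ts) = (PySem.Int.toChars (j : Int)).map PvItem.chr ++ pvSubst j ts := by
  simp [pvSubst]
lemma pvSubst_cons_run_ne {j m : Nat} (h : m ≠ j) {ts : List PvItem} :
    pvSubst j (.run m :: ts) = .run m :: pvSubst j ts := by simp [pvSubst, h]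

lemma pvHeadForm {p : List Char} (hL : 0 < p.length) (w : List Char) :
    p ++ w = p[0] :: (p.drop 1 ++ w) := by
  have hph : p = p[0] :: p.drop 1 := by
    have h0 := List.drop_eq_getElem_cons (l := p) (i := 0) hL
    simpa using h0
  conv_lhs => rw [hph]
  rw [List.cons_append]

lemma pvPrefix_rep {p : List Char} {j : Nat} (hj : 1 ≤ j) : p <+: pvRep p j := by
  have h : j = (j - 1) + 1 := by omega
  rw [h, pvRep_succ]; exact List.prefix_append _ _

-- walking char-by-char through the interior of one separator token: no match anywhere inside
lemma pvStepToken {p : List Char} (hub : pvUnb p) {j : Nat} (hj : 1 ≤ j) (ins : List Char) :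
    ∀ k o, o + k = p.length → 0 < o → ∀ (z acc : List Char) (f : Nat),
      PySem.Chars.replace.go (pvRep p j) ins (f + k) (p.drop o ++ z) acc
        = PySem.Chars.replace.go (pvRep p j) ins f z ((p.drop o).reverse ++ acc) := by
  intro k
  induction k with
  | zero =>
    intro o ho hpos z acc f
    have h : o = p.length := by omega
    subst h
    simp [List.drop_length]
  | succ k ih =>
    intro o ho hpos z acc f
    have holt : o < p.length := by omega
    have hdrop : p.drop o = p[o] :: p.drop (o + 1) := List.drop_eq_getElem_cons holt
    have hnm : ¬ pvRep p j <+: (p.drop o ++ z) := by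
      intro hx
      exact pvBorder_no_match hub hpos holt z ((pvPrefix_rep hj).trans hx)
    rw [hdrop] at hnm ⊢
    simp only [List.cons_append] at hnm ⊢
    rw [show f + (k + 1) = (f + k) + 1 by omega, pvGo_char ins hnm]
    rw [ih (o + 1) (by omega) (by omega) z (p[o] :: acc) f]
    rw [List.reverse_cons]
    simp

-- passing a whole run of a < j separator tokens without any match
lemma pvRunPass {p : List Char} (hp : p ≠ []) (hub : pvUnb p) {j : Nat} (hj : 1 ≤ j)
    (ins : List Char) :
    ∀ (a : Nat), a < j → ∀ (y : List Char), ¬ p <+: y → ∀ (acc : List Char) (f : Nat),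
      PySem.Chars.replace.go (pvRep p j) ins (f + (pvRep p a).length) (pvRep p a ++ y) acc
        = PySem.Chars.replace.go (pvRep p j) ins f y ((pvRep p a).reverse ++ acc) := by
  intro a
  induction a with
  | zero => intro _ y _ acc f; simp [pvRep_zero]
  | succ a ih =>
    intro haj y hy acc f
    have hlen1 : 1 ≤ p.length := List.length_pos_iff.mpr hp
    have hph : p = p[0] :: p.drop 1 := by
      have h0 := List.drop_eq_getElem_cons (l := p) (i := 0) (by omega)
      simpa using h0
    have hnm : ¬ pvRep p j <+: (pvRep p (a + 1) ++ y) := pvRunStart_no_match hp haj hy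
    have hfuel : f + (pvRep p (a + 1)).length
        = ((f + (pvRep p a).length) + (p.length - 1)) + 1 := by
      rw [pvRep_length, pvRep_length, Nat.succ_mul]; omega
    rw [hfuel]
    rw [pvRep_succ] at hnm ⊢
    rw [List.append_assoc] at hnm ⊢
    have hcur : ∀ w : List Char, p ++ w = p[0] :: (p.drop 1 ++ w) := by
      intro w
      conv_lhs => rw [hph]
      rw [List.cons_append]
    rw [hcur (pvRep p a ++ y)] at hnm ⊢
    rw [pvGo_char ins hnm]
    refine (pvStepToken hub hj ins (p.length - 1) 1 (by omega) (by omega) (pvRep p a ++ y)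
      (p[0] :: acc) (f + (pvRep p a).length)).trans ?_
    rw [ih (by omega) y hy]
    congr 1
    rw [List.reverse_append, List.append_assoc]
    congr 1
    conv_rhs => rw [hph]
    rw [List.reverse_cons, List.append_assoc, List.singleton_append]

-- the main characterisation of one replace pass on a well-formed decomposition
lemma pvGoMain {p : List Char} (hp : p ≠ []) (hub : pvUnb p) {j : Nat} (hj : 1 ≤ j)
    (hins : PySem.Int.toChars (j : Int) ≠ [] ∧
      ∀ c ∈ PySem.Int.toChars (j : Int), PySem.Chars.isdigit c = true) :
    ∀ (n : Nat) (ts : List PvItem), (pvDecode p ts).length ≤ n → pvWF p ts → pvRunsLE j ts →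
      ∀ (k : Nat) (acc : List Char),
        PySem.Chars.replace.go (pvRep p j) (PySem.Int.toChars (j : Int))
            ((pvDecode p ts).length + k) (pvDecode p ts) acc
          = acc.reverse ++ pvDecode p (pvSubst j ts) := by
  intro n
  induction n with
  | zero =>
    intro ts hlen hwf hr k acc
    cases ts with
    | nil => simp [pvDecode, pvSubst_nil, pvGo_nil]
    | cons it ts' =>
      exfalso
      cases it with
      | chr c => simp [pvDecode] at hlen
      | run m =>
        have hm1 : 1 ≤ m := hwf.1
        have hL : 1 ≤ p.length := List.length_pos_iff.mpr hp
        have h1e : 1 ≤ m * p.length := Nat.mul_pos hm1 hL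
        simp only [pvDecode, List.length_append, pvRep_length] at hlen
        omega
  | succ n ih =>
    intro ts hlen hwf hr k acc
    cases ts with
    | nil => simp [pvDecode, pvSubst_nil, pvGo_nil]
    | cons it ts' =>
      cases it with
      | chr c =>
        obtain ⟨hnp, hwf'⟩ := hwf
        have hr' : pvRunsLE j ts' := fun m' hm' => hr m' (by simp [hm'])
        have hnm : ¬ pvRep p j <+: (c :: pvDecode p ts') :=
          fun hx => hnp ((pvPrefix_rep hj).trans hx)
        simp only [pvDecode, List.length_cons]
        rw [show (pvDecode p ts').length + 1 + k = ((pvDecode p ts').length + k) + 1 by omega]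
        rw [pvGo_char _ hnm]
        rw [ih ts' (by simp [pvDecode] at hlen; omega) hwf' hr' k (c :: acc)]
        rw [pvSubst_cons_chr]
        simp [pvDecode]
      | run m =>
        obtain ⟨hm1, hnp, hwf'⟩ := hwf
        have hr' : pvRunsLE j ts' := fun m' hm' => hr m' (by simp [hm'])
        have hmj : m ≤ j := hr m (by simp)
        have hL : 1 ≤ p.length := List.length_pos_iff.mpr hp
        have h1e : 1 ≤ m * p.length := Nat.mul_pos hm1 hL
        have hlen' : (pvDecode p ts').length ≤ n := by
          simp only [pvDecode, List.length_append, pvRep_length] at hlen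
          omega
        by_cases hEq : m = j
        · subst hEq
          have hmatch : pvRep p m <+: pvRep p m ++ pvDecode p ts' := List.prefix_append _ _
          have hne : pvRep p m ++ pvDecode p ts' ≠ [] := by
            simp [pvRep_ne_nil hp hm1]
          simp only [pvDecode, List.length_append, pvRep_length]
          rw [show m * p.length + (pvDecode p ts').length + k
              = ((pvDecode p ts').length + (m * p.length - 1 + k)) + 1 by omega]
          rw [pvGo_match _ hne hmatch]
          rw [show (pvRep p m ++ pvDecode p ts').drop (pvRep p m).length
              = pvDecode p ts' from List.drop_left]
          rw [ih ts' hlen' hwf' hr' _ _]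
          rw [pvSubst_cons_run_eq]
          rw [pvDecode_append, pvDecode_map_chr]
          simp
        · have hml : m < j := lt_of_le_of_ne hmj hEq
          simp only [pvDecode, List.length_append]
          rw [show (pvRep p m).length + (pvDecode p ts').length + k
              = ((pvDecode p ts').length + k) + (pvRep p m).length by omega]
          refine (pvRunPass hp hub hj _ m hml (pvDecode p ts') hnp acc
            ((pvDecode p ts').length + k)).trans ?_
          rw [ih ts' hlen' hwf' hr' k _]
          rw [pvSubst_cons_run_ne hEq]
          simp [pvDecode]

lemma pvReplace_subst {p : List Char} (hp : p ≠ []) (hub : pvUnb p) {j : Nat} (hj : 1 ≤ j)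
    (hins : PySem.Int.toChars (j : Int) ≠ [] ∧
      ∀ c ∈ PySem.Int.toChars (j : Int), PySem.Chars.isdigit c = true)
    (ts : List PvItem) (hwf : pvWF p ts) (hr : pvRunsLE j ts) :
    PySem.Chars.replace (pvDecode p ts) (pvRep p j) (PySem.Int.toChars (j : Int))
      = pvDecode p (pvSubst j ts) := by
  have hone : pvRep p j ≠ [] := pvRep_ne_nil hp hj
  have hgo := pvGoMain hp hub hj hins (pvDecode p ts).length ts le_rfl hwf hr 0 []
  rw [Nat.add_zero] at hgo
  unfold PySem.Chars.replace
  rw [if_neg (by simp [hone])]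
  simpa using hgo

-- a match that only touches inserted digit characters is impossible for a digit-free separator
lemma pvMatchAcross {p : List Char} (hpd : ∀ c ∈ p, PySem.Chars.isdigit c = false) {j : Nat}
    (hins : PySem.Int.toChars (j : Int) ≠ [] ∧
      ∀ c ∈ PySem.Int.toChars (j : Int), PySem.Chars.isdigit c = true) :
    ∀ (ts : List PvItem) (u : List Char),
      p <+: u ++ pvDecode p (pvSubst j ts) → p <+: u ++ pvDecode p ts := by
  intro ts
  induction ts with
  | nil => intro u h; exact h
  | cons it ts ih =>
    intro u h
    cases it with
    | chr c =>
      rw [pvSubst_cons_chr] at h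
      simp only [pvDecode] at h ⊢
      rw [List.append_cons] at h ⊢
      exact ih (u ++ [c]) h
    | run m =>
      by_cases hEq : m = j
      · rw [hEq] at h ⊢
        rw [pvSubst_cons_run_eq, pvDecode_append, pvDecode_map_chr] at h
        by_cases hlen : p.length ≤ u.length
        · have htk := List.prefix_iff_eq_take.mp h
          rw [List.take_append_of_le_length hlen] at htk
          have hpu : p <+: u := htk ▸ List.take_prefix _ _
          exact hpu.trans (List.prefix_append _ _)
        · exfalso
          obtain ⟨i0, irest, hins0⟩ := List.exists_cons_of_ne_nil hins.1
          rw [hins0, List.cons_append] at h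
          have hid : i0 ∈ PySem.Int.toChars (j : Int) := by rw [hins0]; simp
          have hu : u.length < p.length := by omega
          have hgl := h.getElem hu
          have hgr : (u ++ i0 :: (irest ++ pvDecode p (pvSubst j ts)))[u.length]'(by
              simp) = i0 := by
            rw [List.getElem_append_right (le_refl u.length)]
            simp
          have hpe : p[u.length] = i0 := hgl.trans hgr
          have hmem : i0 ∈ p := hpe ▸ List.getElem_mem hu
          have hT := hins.2 i0 hid
          rw [hpd i0 hmem] at hT
          exact absurd hT (by decide)
      · rw [pvSubst_cons_run_ne hEq] at h
        simp only [pvDecode] at h ⊢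
        rw [← List.append_assoc] at h ⊢
        exact ih (u ++ pvRep p m) h

lemma pvNoPrefixDigit {p : List Char} (hp : p ≠ [])
    (hpd : ∀ c ∈ p, PySem.Chars.isdigit c = false) {d : Char}
    (hd : PySem.Chars.isdigit d = true) (w : List Char) : ¬ p <+: (d :: w) := by
  obtain ⟨ph, pt, rfl⟩ := List.exists_cons_of_ne_nil hp
  intro h
  obtain ⟨hph, -⟩ := List.cons_prefix_cons.mp h
  have hf := hpd ph (by simp)
  rw [hph, hd] at hf
  simp at hf

lemma pvWF_subst {p : List Char} (hp : p ≠ [])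
    (hpd : ∀ c ∈ p, PySem.Chars.isdigit c = false) {j : Nat}
    (hins : PySem.Int.toChars (j : Int) ≠ [] ∧
      ∀ c ∈ PySem.Int.toChars (j : Int), PySem.Chars.isdigit c = true) :
    ∀ (ts : List PvItem), pvWF p ts → pvWF p (pvSubst j ts) := by
  have hblock : ∀ (ds : List Char), (∀ c ∈ ds, PySem.Chars.isdigit c = true) →
      ∀ (rest : List PvItem), pvWF p rest → pvWF p (ds.map PvItem.chr ++ rest) := by
    intro ds
    induction ds with
    | nil => intro _ rest h; simpa using h
    | cons d ds ihd =>
      intro hds rest h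
      refine ⟨pvNoPrefixDigit hp hpd (hds d (by simp)) _, ?_⟩
      exact ihd (fun c hc => hds c (by simp [hc])) rest h
  intro ts
  induction ts with
  | nil => intro h; exact h
  | cons it ts ih =>
    intro hwf
    cases it with
    | chr c =>
      rw [pvSubst_cons_chr]
      refine ⟨?_, ih hwf.2⟩
      intro hx
      apply hwf.1
      have := pvMatchAcross hpd hins ts [c] (by simpa using hx)
      simpa using this
    | run m =>
      obtain ⟨hm1, hnp, hwf'⟩ := hwf
      by_cases hEq : m = j
      · subst hEq
        rw [pvSubst_cons_run_eq]
        exact hblock _ hins.2 _ (ih hwf')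
      · rw [pvSubst_cons_run_ne hEq]
        refine ⟨hm1, ?_, ih hwf'⟩
        intro hx
        apply hnp
        have := pvMatchAcross hpd hins ts [] (by simpa using hx)
        simpa using this

lemma pvRunsLE_subst {j : Nat} :
    ∀ (ts : List PvItem), pvRunsLE j ts → pvRunsLE (j - 1) (pvSubst j ts) := by
  intro ts h m' hm'
  simp only [pvSubst, List.mem_flatMap] at hm'
  obtain ⟨it, hit, hmem⟩ := hm'
  cases it with
  | chr c => simp at hmem
  | run m =>
    by_cases hEq : m = j
    · rw [hEq] at hmem
      simp at hmem
    · simp [hEq] at hmem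
      have := h m hit
      omega

lemma pvEncItems_subst {j : Nat} :
    ∀ (ts : List PvItem), pvEncItems (pvSubst j ts) = pvEncItems ts := by
  intro ts
  induction ts with
  | nil => rfl
  | cons it ts ih =>
    cases it with
    | chr c => rw [pvSubst_cons_chr]; simp [pvEncItems, ih]
    | run m =>
      by_cases hEq : m = j
      · subst hEq
        rw [pvSubst_cons_run_eq, pvEncItems_append, pvEncItems_map_chr]
        simp [pvEncItems, ih]
      · rw [pvSubst_cons_run_ne hEq]
        simp [pvEncItems, ih]

lemma pvTCaux (j : Nat) (ds : List Char) (h : PySem.Int.toChars (j : Int) = ds)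
    (hne : ds ≠ []) (hd : ∀ c ∈ ds, PySem.Chars.isdigit c = true) :
    PySem.Int.toChars (j : Int) ≠ [] ∧
      ∀ c ∈ PySem.Int.toChars (j : Int), PySem.Chars.isdigit c = true := by
  rw [h]; exact ⟨hne, hd⟩

lemma pvToCharsDigits : ∀ j : Nat, 1 ≤ j → j ≤ 8 →
    PySem.Int.toChars (j : Int) ≠ [] ∧
      ∀ c ∈ PySem.Int.toChars (j : Int), PySem.Chars.isdigit c = true := by
  intro j h1 h8
  interval_cases j
  · exact pvTCaux 1 ['1'] (by simp [PySem.Int.toChars]; norm_num [Nat.toDigits, Nat.toDigitsCore, Nat.digitChar]) (by simp) (by intro c hc; simp at hc; subst hc; rfl)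
  · exact pvTCaux 2 ['2'] (by simp [PySem.Int.toChars]; norm_num [Nat.toDigits, Nat.toDigitsCore, Nat.digitChar]) (by simp) (by intro c hc; simp at hc; subst hc; rfl)
  · exact pvTCaux 3 ['3'] (by simp [PySem.Int.toChars]; norm_num [Nat.toDigits, Nat.toDigitsCore, Nat.digitChar]) (by simp) (by intro c hc; simp at hc; subst hc; rfl)
  · exact pvTCaux 4 ['4'] (by simp [PySem.Int.toChars]; norm_num [Nat.toDigits, Nat.toDigitsCore, Nat.digitChar]) (by simp) (by intro c hc; simp at hc; subst hc; rfl)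
  · exact pvTCaux 5 ['5'] (by simp [PySem.Int.toChars]; norm_num [Nat.toDigits, Nat.toDigitsCore, Nat.digitChar]) (by simp) (by intro c hc; simp at hc; subst hc; rfl)
  · exact pvTCaux 6 ['6'] (by simp [PySem.Int.toChars]; norm_num [Nat.toDigits, Nat.toDigitsCore, Nat.digitChar]) (by simp) (by intro c hc; simp at hc; subst hc; rfl)
  · exact pvTCaux 7 ['7'] (by simp [PySem.Int.toChars]; norm_num [Nat.toDigits, Nat.toDigitsCore, Nat.digitChar]) (by simp) (by intro c hc; simp at hc; subst hc; rfl)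
  · exact pvTCaux 8 ['8'] (by simp [PySem.Int.toChars]; norm_num [Nat.toDigits, Nat.toDigitsCore, Nat.digitChar]) (by simp) (by intro c hc; simp at hc; subst hc; rfl)

lemma pvDecode_eq_enc_of_norun {p : List Char} :
    ∀ ts, pvWF p ts → pvRunsLE 0 ts → pvDecode p ts = pvEncItems ts := by
  intro ts
  induction ts with
  | nil => intro _ _; rfl
  | cons it r ih =>
    intro hwf hr
    cases it with
    | chr c =>
      simp only [pvDecode, pvEncItems]
      rw [ih hwf.2 (fun m hm => hr m (by simp [hm]))]
    | run m =>
      have := hr m (by simp)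
      have := hwf.1
      omega

-- A's inner loop over range(8, 0, -1) on a decomposed chunk yields the run-length encoding
lemma pvChain {p : List Char} (hp : p ≠ []) (hub : pvUnb p)
    (hpd : ∀ c ∈ p, PySem.Chars.isdigit c = false) :
    ∀ (j : Nat), j ≤ 8 → ∀ (ts : List PvItem), pvWF p ts → pvRunsLE j ts →
      (PySem.List.pyRange (j : Int) 0 (-1)).foldl
          (fun l i => PySem.Chars.replace l (PySem.List.pyRepeat p i) (PySem.Int.toChars i)) (pvDecode p ts)
        = pvEncItems ts := by
  intro j
  induction j with
  | zero =>
    intro _ ts hwf hr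
    rw [show ((0:ℕ):Int) = 0 from rfl, PySem.List.pyRange_neg_one_eq_nil le_rfl]
    rw [List.foldl_nil]
    exact pvDecode_eq_enc_of_norun ts hwf hr
  | succ j ihj =>
    intro hj8 ts hwf hr
    have hins := pvToCharsDigits (j + 1) (by omega) hj8
    have hcons : PySem.List.pyRange (((j+1):ℕ):Int) 0 (-1)
        = (((j+1):ℕ):Int) :: PySem.List.pyRange ((((j+1):ℕ):Int) - 1) 0 (-1) :=
      PySem.List.pyRange_neg_one_cons (by exact_mod_cast Nat.succ_pos j)
    rw [hcons, show ((((j+1):ℕ):Int) - 1) = ((j:ℕ):Int) by push_cast; ring]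
    rw [List.foldl_cons]
    rw [show PySem.List.pyRepeat p (((j+1):ℕ):Int) = pvRep p (j+1) from by
      simp [PySem.List.pyRepeat, pvRep]]
    rw [pvReplace_subst hp hub (by omega) hins ts hwf hr]
    rw [ihj (by omega) (pvSubst (j+1) ts) (pvWF_subst hp hpd hins ts hwf)
      (by have := pvRunsLE_subst ts hr; simpa using this)]
    exact pvEncItems_subst ts

-- every chunk has a greedy decomposition
lemma pvDecompose {p : List Char} (hp : p ≠ []) :
    ∀ (s : List Char), ∃ ts, pvWF p ts ∧ pvDecode p ts = s := by
  have hL : 0 < p.length := List.length_pos_iff.mpr hp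
  have H : ∀ n (s : List Char), s.length ≤ n → ∃ ts, pvWF p ts ∧ pvDecode p ts = s := by
    intro n
    induction n with
    | zero =>
      intro s hlen
      have hs : s = [] := List.length_eq_zero_iff.mp (by omega)
      exact ⟨[], trivial, by rw [hs]; rfl⟩
    | succ n ih =>
      intro s hlen
      by_cases hpre : p <+: s
      · obtain ⟨s', rfl⟩ := hpre
        have hs' : s'.length ≤ n := by
          rw [List.length_append] at hlen; omega
        obtain ⟨ts', hwf', hdec⟩ := ih s' hs'
        cases ts' with
        | nil =>
          refine ⟨[.run 1], ⟨le_rfl, ?_, trivial⟩, ?_⟩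
          · intro hx
            exact hp (List.prefix_nil.mp hx)
          · simp only [pvDecode] at hdec ⊢
            rw [← hdec]
            simp [pvRep]
        | cons it r =>
          cases it with
          | run m =>
            obtain ⟨hm1, hnpr, hwfr⟩ := hwf'
            refine ⟨.run (m+1) :: r, ⟨by omega, hnpr, hwfr⟩, ?_⟩
            simp only [pvDecode] at hdec ⊢
            rw [pvRep_succ, List.append_assoc, hdec]
          | chr c =>
            obtain ⟨hnpr, hwfr⟩ := hwf'
            refine ⟨.run 1 :: .chr c :: r, ⟨le_rfl, ?_, hnpr, hwfr⟩, ?_⟩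
            · simp only [pvDecode]
              exact hnpr
            · simp only [pvDecode] at hdec ⊢
              rw [hdec]
              simp [pvRep]
      · cases s with
        | nil => exact ⟨[], trivial, rfl⟩
        | cons c t =>
          obtain ⟨ts', hwf', hdec⟩ := ih t (by simp at hlen; omega)
          refine ⟨.chr c :: ts', ⟨?_, hwf'⟩, by simp [pvDecode, hdec]⟩
          rw [hdec]
          exact hpre
  intro s
  exact H s.length s le_rfl

lemma pvRunsLE_of_len {p : List Char} (hp : p ≠ []) :
    ∀ (ts : List PvItem), pvWF p ts → (pvDecode p ts).length ≤ 8 → pvRunsLE 8 ts := by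
  intro ts
  induction ts with
  | nil => intro _ _ m hm; simp at hm
  | cons it r ih =>
    intro hwf hlen m hm
    cases it with
    | chr c =>
      rcases List.mem_cons.mp hm with h | h
      · simp at h
      · refine ih hwf.2 ?_ m h
        simp only [pvDecode, List.length_cons] at hlen
        omega
    | run mm =>
      obtain ⟨h1, -, hwfr⟩ := hwf
      have hL : 1 ≤ p.length := List.length_pos_iff.mpr hp
      have hml : mm ≤ mm * p.length := Nat.le_mul_of_pos_right mm hL
      simp only [pvDecode, List.length_append, pvRep_length] at hlen
      rcases List.mem_cons.mp hm with h | h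
      · have hmeq : m = mm := by cases h; rfl
        omega
      · exact ih hwfr (by omega) m h

-- ===== B side =====
lemma pvEncChunk_nil (sep : List Char) (cnt : Int) :
    pvEncChunk sep [] cnt = if cnt > 0 then PySem.Int.toChars cnt else [] := by
  rw [pvEncChunk]

lemma pvEncChunk_cons_match {sep : List Char} {c : Char} {t : List Char}
    (h : sep ≠ [] ∧ sep <+: (c :: t)) (cnt : Int) :
    pvEncChunk sep (c :: t) cnt = pvEncChunk sep ((c :: t).drop sep.length) (cnt + 1) := by
  rw [pvEncChunk]
  simp only [dif_pos h]

lemma pvEncChunk_cons_nomatch {sep : List Char} {c : Char} {t : List Char}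
    (h : ¬ (sep ≠ [] ∧ sep <+: (c :: t))) (cnt : Int) :
    pvEncChunk sep (c :: t) cnt
      = (if cnt > 0 then PySem.Int.toChars cnt else []) ++ c :: pvEncChunk sep t 0 := by
  rw [pvEncChunk]
  simp only [dif_neg h]

lemma pvEncChunk_run {p : List Char} (hp : p ≠ []) {y : List Char} (hy : ¬ p <+: y) :
    ∀ (m : Nat) (cnt : Int), pvEncChunk p (pvRep p m ++ y) cnt = pvEncChunk p y (cnt + m) := by
  have hL : 0 < p.length := List.length_pos_iff.mpr hp
  intro m
  induction m with
  | zero => intro cnt; simp [pvRep_zero]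
  | succ m ih =>
    intro cnt
    rw [pvRep_succ, List.append_assoc, pvHeadForm hL]
    rw [pvEncChunk_cons_match ⟨hp, by rw [← pvHeadForm hL]; exact List.prefix_append _ _⟩]
    rw [show (p[0] :: (p.drop 1 ++ (pvRep p m ++ y))).drop p.length = pvRep p m ++ y from by
      rw [← pvHeadForm hL]; exact List.drop_left]
    rw [ih (cnt + 1)]
    congr 1
    push_cast
    ring

lemma pvEncChunk_main {p : List Char} (hp : p ≠ []) :
    ∀ (ts : List PvItem), pvWF p ts → ∀ (cnt : Int), 0 ≤ cnt →
      (p <+: pvDecode p ts → cnt = 0) →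
      pvEncChunk p (pvDecode p ts) cnt
        = (if cnt > 0 then PySem.Int.toChars cnt else []) ++ pvEncItems ts := by
  intro ts
  induction ts with
  | nil =>
    intro _ cnt _ _
    simp only [pvDecode, pvEncItems]
    rw [pvEncChunk_nil]
    simp
  | cons it r ih =>
    cases it with
    | chr c =>
      intro hwf cnt h0 hc0
      simp only [pvDecode, pvEncItems]
      rw [pvEncChunk_cons_nomatch (fun hx => hwf.1 hx.2)]
      rw [ih hwf.2 0 le_rfl (fun _ => rfl)]
      simp
    | run m =>
      intro hwf cnt h0 hc0
      obtain ⟨hm1, hnp, hwfr⟩ := hwf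
      have hcnt : cnt = 0 := by
        apply hc0
        simp only [pvDecode]
        exact (pvPrefix_rep hm1).trans (List.prefix_append _ _)
      subst hcnt
      simp only [pvDecode, pvEncItems]
      rw [pvEncChunk_run hp hnp m 0]
      rw [ih hwfr ((0:Int) + m) (by positivity) (fun hx => absurd hx hnp)]
      have hmz : (0:Int) + (m:Int) = (m:Int) := by ring
      rw [hmz]
      have hpos : ((m:Int) > 0) = True := by
        simp only [eq_iff_iff, iff_true]
        exact_mod_cast hm1
      simp
      intro h
      omega

-- ===== per-chunk equality =====
lemma pvChunkEq {p : List Char} (hp : p ≠ []) (hub : pvUnb p)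
    (hpd : ∀ c ∈ p, PySem.Chars.isdigit c = false) (c : List Char) (hc : c.length ≤ 8) :
    (PySem.List.pyRange 8 0 (-1)).foldl
        (fun l i => PySem.Chars.replace l (PySem.List.pyRepeat p i) (PySem.Int.toChars i)) c
      = pvEncChunk p c 0 := by
  obtain ⟨ts, hwf, hdec⟩ := pvDecompose hp c
  subst hdec
  rw [show (8:Int) = ((8:ℕ):Int) from by norm_num]
  rw [pvChain hp hub hpd 8 le_rfl ts hwf (pvRunsLE_of_len hp ts hwf hc)]
  rw [pvEncChunk_main hp ts hwf 0 le_rfl (fun _ => rfl)]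
  simp

-- ===== glue to the String-level ports =====
lemma pvFoldlAppendMap {α β : Type} (f : α → β) (l : List α) :
    ∀ init : List β, l.foldl (fun res x => res ++ [f x]) init = init ++ l.map f := by
  induction l with
  | nil => simp
  | cons x xs ih => intro init; simp [ih]

lemma pvInnerFold_toList (sep : String) :
    ∀ (is : List Int) (line : String),
      ((is).foldl (fun l i =>
          PySem.Str.replace l (String.ofList (PySem.List.pyRepeat sep.toList i))
            (PySem.Int.toStr i)) line).toList
        = (is).foldl (fun l i =>
            PySem.Chars.replace l (PySem.List.pyRepeat sep.toList i) (PySem.Int.toChars i))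
          line.toList := by
  intro is
  induction is with
  | nil => intro line; rfl
  | cons i is ih =>
    intro line
    simp only [List.foldl_cons]
    rw [ih]
    congr 1
    simp [PySem.Str.toList_replace, PySem.Int.toList_toStr]

lemma pvChunkLen (string : String) (i : Int) (h0 : 0 ≤ i) :
    (PySem.Str.slice string (some i) (some (i + 8))).toList.length ≤ 8 := by
  have h8 : (0:Int) ≤ i + 8 := by omega
  simp only [PySem.Str.toList_slice, PySem.Chars.slice_eq_listSlice]
  rw [PySem.List.slice_toNat string.toList h0 h8]
  have : (i + 8).toNat - i.toNat = 8 := by omega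
  simp [List.length_take, this]

-- ===== VERDICT (by name: the statement is the Claim_ definition above) =====
theorem grid2fen_spec : Claim_equal_grid2fen := by
  intro string separator _ hpre
  obtain ⟨hs0, hpdB, hubB⟩ := hpre
  have hpd : ∀ c ∈ separator.toList, PySem.Chars.isdigit c = false := by
    intro c hc
    have := List.all_eq_true.mp hpdB c hc
    simpa using this
  have hub : pvUnb separator.toList := by
    intro o ho hpos
    have := List.all_eq_true.mp hubB o (List.mem_range.mpr ho)
    simp only [Bool.or_eq_true, beq_iff_eq] at this
    rcases this with h1 | h2
    · omega
    · simpa using h2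
  have hp : separator.toList ≠ [] := by
    intro h
    exact hs0 (String.toList_inj.mp (by rw [h]; rfl))
  unfold Spec_grid2fen
  simp only [grid2fen, grid2fen_alt]
  rw [pvFoldlAppendMap]
  simp only [List.nil_append]
  congr 1
  rw [List.map_map, List.map_map]
  apply List.map_congr_left
  intro i hi
  simp only [Function.comp_apply]
  have h0 : 0 ≤ i := by
    have := (PySem.List.mem_pyRange_iff_of_pos (by norm_num) i).mp hi
    exact this.1
  apply String.toList_inj.mp
  rw [pvInnerFold_toList]
  rw [show (String.ofList (pvEncChunk separator.toList
      (PySem.Str.slice string (some i) (some (i + 8))).toList 0)).toList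
    = pvEncChunk separator.toList
        (PySem.Str.slice string (some i) (some (i + 8))).toList 0 from by simp]
  exact pvChunkEq hp hub hpd _ (pvChunkLen string i h0)
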